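-- pv_equiv track=rewrite | github.com/jlotto8/UDD | Mentor Exercises/mikes_alpha_chain.py | find_chains_for_word
-- ===== SOURCE A (Python) =====
-- def find_chains_for_word(word_array, previous_longest_chain_length):
--     chain_length_to_beat = previous_longest_chain_length
--     running_total_chain_length = 0
--     longest_chains_for_word = None
--     working_chain = ""
--
--     for index in range(len(word_array)):
--         # build the chain
--         if word_array[index] is not None:
--             working_chain += chr(index + 97)
--             running_total_chain_length += 1
--
--         # stopping condition, check if longest chain and add to solution in word
--         if index == len(word_array) - 1 or word_array[index] == None:
--
--             # if longest, record that and remove old entries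
--             if running_total_chain_length > chain_length_to_beat:
--                 chain_length_to_beat = running_total_chain_length
--                 longest_chains_for_word = [working_chain]
--
--             # if equal, add to found chains
--             elif running_total_chain_length == chain_length_to_beat:
--                 if longest_chains_for_word is not None:
--                     longest_chains_for_word.append(working_chain)
--                 else:
--                     longest_chains_for_word = [working_chain]
--
--             # if not long enough, ignore
--
--             #reset
--             running_total_chain_length = 0
--             working_chain = ""
--
--     if longest_chains_for_word == None:
--         return None, previous_longest_chain_length
--     else:
--         return longest_chains_for_word, chain_length_to_beat
-- ===== SOURCE B (Python) =====
-- def find_chains_for_word(word_array, previous_longest_chain_length):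
--     if not word_array:
--         return None, previous_longest_chain_length
--     # pass 1: collect every flushed chain (split on Nones; a trailing None flushes
--     # its chain at the None itself, so nothing is flushed after it)
--     chains = []
--     current = ""
--     for index, value in enumerate(word_array):
--         if value is None:
--             chains.append(current)
--             current = ""
--         else:
--             current += chr(index + 97)
--     if word_array[-1] is not None:
--         chains.append(current)
--     # pass 2: select
--     best = max(len(c) for c in chains)
--     if best < previous_longest_chain_length:
--         return None, previous_longest_chain_length
--     return [c for c in chains if len(c) == best], best
-- ===== Notes on version B (the rewrite author's own statement) =====
-- stated objective: simpler
-- what changed: Replaces A's streaming loop that tracks four variables and updates the best-chain list inline with a build-then-select decomposition: one pass collects the letter chains split on Nones, then the best length and its ties are picked by a max and a filter.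
import Mathlib
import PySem

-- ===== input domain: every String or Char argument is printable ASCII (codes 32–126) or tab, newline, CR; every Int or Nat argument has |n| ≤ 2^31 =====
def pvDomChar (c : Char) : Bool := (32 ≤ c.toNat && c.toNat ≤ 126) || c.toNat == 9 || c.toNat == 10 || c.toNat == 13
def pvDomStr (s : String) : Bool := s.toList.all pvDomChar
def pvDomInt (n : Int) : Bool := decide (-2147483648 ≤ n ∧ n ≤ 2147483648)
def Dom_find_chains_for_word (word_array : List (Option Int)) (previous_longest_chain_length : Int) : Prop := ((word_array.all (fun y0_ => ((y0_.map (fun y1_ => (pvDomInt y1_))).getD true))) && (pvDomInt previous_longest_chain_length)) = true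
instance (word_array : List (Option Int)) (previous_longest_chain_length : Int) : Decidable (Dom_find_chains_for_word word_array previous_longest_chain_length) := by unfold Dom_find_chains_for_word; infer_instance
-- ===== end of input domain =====

-- B is simpler: it collects the letter chains in one pass and then selects the best by max + filter,
-- instead of A's inline streaming max-tracking. Equivalence on all inputs (both are total).

-- ===== PORT A =====
-- loop body of A's 'for index in range(len(word_array))', state = (chain_length_to_beat, running_total_chain_length, longest_chains_for_word, working_chain)
def aBody (word_array : List (Option Int)) (n : Int)
    (st : Int × Int × Option (List String) × List Char) (index : Int) :
    Int × Int × Option (List String) × List Char :=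
  let beat := st.1
  let running := st.2.1
  let longest := st.2.2.1
  let working := st.2.2.2
  -- build the chain
  let rw :=
    if PySem.List.pyGetD word_array index none ≠ none then
      (running + 1, working ++ [Char.ofNat ((index + 97).toNat)])
    else (running, working)
  let running := rw.1
  let working := rw.2
  -- stopping condition
  if index == n - 1 || PySem.List.pyGetD word_array index none == none then
    let bl :=
      if running > beat then (running, some [String.ofList working])
      else if running == beat then
        (beat, match longest with
               | some l => some (l ++ [String.ofList working])
               | none => some [String.ofList working])
      else (beat, longest)
    (bl.1, 0, bl.2, ([] : List Char))
  else (beat, running, longest, working)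

def find_chains_for_word (word_array : List (Option Int)) (previous_longest_chain_length : Int) : Option (List String) × Int :=
  let n := PySem.List.len word_array
  let st := (PySem.List.pyRange 0 n 1).foldl (aBody word_array n)
      (previous_longest_chain_length, 0, none, ([] : List Char))
  match st.2.2.1 with
  | none => (none, previous_longest_chain_length)
  | some l => (some l, st.1)

-- ===== PORT B =====
-- loop body of B's 'for index, value in enumerate(word_array)', state = (chains, current)
def bStep (s : List (List Char) × List Char) (p : Int × Option Int) : List (List Char) × List Char :=
  match p.2 with
  | none => (s.1 ++ [s.2], ([] : List Char))
  | some _ => (s.1, s.2 ++ [Char.ofNat ((p.1 + 97).toNat)])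

def find_chains_for_word_alt (word_array : List (Option Int)) (previous_longest_chain_length : Int) : Option (List String) × Int :=
  if word_array.isEmpty then (none, previous_longest_chain_length)
  else
    let st := (PySem.List.enumerate word_array).foldl bStep ([], ([] : List Char))
    let chains := if PySem.List.pyGetD word_array (-1) none ≠ none then st.1 ++ [st.2] else st.1
    match (chains.map (fun c => (c.length : Int))).max? with
    | none => (none, previous_longest_chain_length)   -- unreachable: chains is nonempty
    | some best =>
      if best < previous_longest_chain_length then (none, previous_longest_chain_length)
      else (some ((chains.filter (fun c => (c.length : Int) == best)).map String.ofList), best)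

-- ===== PRECONDITION & SPEC =====
def Spec_find_chains_for_word (word_array : List (Option Int)) (previous_longest_chain_length : Int) (out : Option (List String) × Int) : Prop := out = find_chains_for_word_alt word_array previous_longest_chain_length
instance (word_array : List (Option Int)) (previous_longest_chain_length : Int) (out : Option (List String) × Int) : Decidable (Spec_find_chains_for_word word_array previous_longest_chain_length out) := by unfold Spec_find_chains_for_word; infer_instance

-- ===== CLAIM (what is proved, stated in full; the proofs are below) =====
def Claim_equal_find_chains_for_word : Prop := ∀ (word_array : List (Option Int)) (previous_longest_chain_length : Int), Dom_find_chains_for_word word_array previous_longest_chain_length → Spec_find_chains_for_word word_array previous_longest_chain_length (find_chains_for_word word_array previous_longest_chain_length)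

-- ===== LEMMAS AND PROOFS =====

-- the chains A flushes while scanning ys starting at absolute index k with partial chain cur
def chainsAt : List (Option Int) → Int → List Char → List (List Char)
  | [], _, _ => []
  | [x], k, cur => [if x = none then cur else cur ++ [Char.ofNat ((k + 97).toNat)]]
  | x :: y :: ys, k, cur =>
      if x = none then cur :: chainsAt (y :: ys) (k + 1) ([] : List Char)
      else chainsAt (y :: ys) (k + 1) (cur ++ [Char.ofNat ((k + 97).toNat)])

-- A's selection logic, applied to one flushed chain
def selStep (s : Int × Option (List String)) (c : List Char) : Int × Option (List String) :=
  if (c.length : Int) > s.1 then ((c.length : Int), some [String.ofList c])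
  else if (c.length : Int) == s.1 then
    (s.1, match s.2 with
          | some l => some (l ++ [String.ofList c])
          | none => some [String.ofList c])
  else s

def maxFrom (b : Int) (chains : List (List Char)) : Int :=
  (chains.map (fun c => (c.length : Int))).foldl max b

lemma maxFrom_max (l : List (List Char)) (a x : Int) :
    maxFrom (max a x) l = max a (maxFrom x l) := by
  induction l generalizing x with
  | nil => simp [maxFrom]
  | cons c r ih =>
      simp only [maxFrom, List.map_cons, List.foldl_cons] at *
      rw [max_assoc]
      exact ih _

lemma le_maxFrom (b : Int) (l : List (List Char)) : b ≤ maxFrom b l := by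
  induction l generalizing b with
  | nil => simp [maxFrom]
  | cons c r ih =>
      simp only [maxFrom, List.map_cons, List.foldl_cons]
      exact le_trans (le_max_left _ _) (ih _)

lemma sel_some (chains : List (List Char)) (b : Int) (la : List String) :
    chains.foldl selStep (b, some la) =
      (maxFrom b chains,
       some ((if maxFrom b chains = b then la else []) ++
         (chains.filter (fun c => ((c.length : Int) == maxFrom b chains))).map String.ofList)) := by
  induction chains generalizing b la with
  | nil => simp [maxFrom]
  | cons c r ih =>
      have hM : maxFrom b (c :: r) = maxFrom (max b (c.length : Int)) r := by
        simp [maxFrom]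
      simp only [List.foldl_cons]
      by_cases h1 : (c.length : Int) > b
      · rw [show selStep (b, some la) c = ((c.length : Int), some [String.ofList c]) by
          simp [selStep, h1]]
        have hmax : max b (c.length : Int) = (c.length : Int) := max_eq_right h1.le
        have hge : (c.length : Int) ≤ maxFrom (c.length : Int) r := le_maxFrom _ _
        rw [ih, hM, hmax]
        have hne : maxFrom (c.length : Int) r ≠ b := by omega
        rw [if_neg hne]
        by_cases hc : maxFrom (c.length : Int) r = (c.length : Int)
        · simp [hc]
        · simp [hc, Ne.symm hc]
      · by_cases h2 : (c.length : Int) = b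
        · rw [show selStep (b, some la) c = (b, some (la ++ [String.ofList c])) by
            simp [selStep, h2]]
          have hmax : max b (c.length : Int) = b := by omega
          rw [ih, hM, hmax]
          by_cases hc : maxFrom b r = b
          · simp [hc, h2, List.append_assoc]
          · simp [hc, h2, Ne.symm hc]
        · rw [show selStep (b, some la) c = (b, some la) by
            simp [selStep, h1, h2]]
          have hmax : max b (c.length : Int) = b := by omega
          have hge : b ≤ maxFrom b r := le_maxFrom _ _
          rw [ih, hM, hmax]
          have hc : ¬ ((c.length : Int) = maxFrom b r) := by omega
          simp [hc]

lemma sel_none (c : List Char) (r : List (List Char)) (b : Int) :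
    (c :: r).foldl selStep (b, none) =
      (if maxFrom (c.length : Int) r < b then (b, none)
       else (maxFrom (c.length : Int) r,
         some (((c :: r).filter (fun x => ((x.length : Int) == maxFrom (c.length : Int) r))).map String.ofList))) := by
  induction r generalizing c b with
  | nil =>
      by_cases h1 : (c.length : Int) > b
      · rw [show ([c] : List (List Char)).foldl selStep (b, none)
              = ((c.length : Int), some [String.ofList c]) by simp [selStep, h1]]
        rw [if_neg (by simp [maxFrom]; omega)]
        simp [maxFrom]
      · by_cases h2 : (c.length : Int) = b
        · rw [show ([c] : List (List Char)).foldl selStep (b, none)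
                = (b, some [String.ofList c]) by simp [selStep, h2]]
          rw [if_neg (by simp [maxFrom]; omega)]
          simp [maxFrom, h2]
        · rw [show ([c] : List (List Char)).foldl selStep (b, none) = (b, none) by
            simp [selStep, h1, h2]]
          rw [if_pos (by simp [maxFrom]; omega)]
  | cons c' r' ih =>
      have hM : maxFrom (c.length : Int) (c' :: r')
          = max (c.length : Int) (maxFrom (c'.length : Int) r') := by
        have : maxFrom (c.length : Int) (c' :: r')
            = maxFrom (max (c.length : Int) (c'.length : Int)) r' := by simp [maxFrom]
        rw [this, maxFrom_max]
      rw [show (c :: c' :: r').foldl selStep (b, none)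
            = (c' :: r').foldl selStep (selStep (b, none) c) from rfl]
      have hgeM : (c.length : Int) ≤ maxFrom (c.length : Int) (c' :: r') := le_maxFrom _ _
      by_cases h1 : (c.length : Int) > b
      · rw [show selStep (b, none) c = ((c.length : Int), some [String.ofList c]) by
          simp [selStep, h1]]
        rw [sel_some]
        have hnb : ¬ (maxFrom (c.length : Int) (c' :: r') < b) := by omega
        rw [if_neg hnb]
        by_cases hc : maxFrom (c.length : Int) (c' :: r') = (c.length : Int)
        · simp [List.filter_cons, hc]
        · simp [List.filter_cons, hc, Ne.symm hc]
      · by_cases h2 : (c.length : Int) = b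
        · rw [show selStep (b, none) c = (b, some [String.ofList c]) by
            simp [selStep, h2]]
          rw [sel_some]
          have hnb : ¬ (maxFrom (c.length : Int) (c' :: r') < b) := by omega
          rw [if_neg hnb, h2]
          by_cases hc : maxFrom b (c' :: r') = b
          · simp [List.filter_cons, hc, h2]
          · simp [List.filter_cons, hc, h2, Ne.symm hc]
        · rw [show selStep (b, none) c = (b, none) by simp [selStep, h1, h2]]
          rw [ih]
          have hge : (c'.length : Int) ≤ maxFrom (c'.length : Int) r' := le_maxFrom _ _
          by_cases hlt : maxFrom (c'.length : Int) r' < b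
          · rw [if_pos hlt, if_pos (by rw [hM]; omega)]
          · rw [if_neg hlt]
            have hMM : maxFrom (c.length : Int) (c' :: r') = maxFrom (c'.length : Int) r' := by
              rw [hM]; omega
            have hnb : ¬ (maxFrom (c.length : Int) (c' :: r') < b) := by omega
            rw [if_neg hnb, hMM]
            have hc : ¬ ((c.length : Int) = maxFrom (c'.length : Int) r') := by omega
            simp [List.filter_cons, hc]

lemma chainsAt_ne_nil (ys : List (Option Int)) (k : Int) (cur : List Char) (h : ys ≠ []) :
    chainsAt ys k cur ≠ [] := by
  match ys with
  | [x] => by_cases hx : x = none <;> simp [chainsAt, hx]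
  | x :: y :: t =>
      by_cases hx : x = none <;>
        simp [chainsAt, hx, chainsAt_ne_nil (y :: t) (k + 1)]

-- A's index loop computes the selStep fold over the flushed chains
lemma loopA (ys : List (Option Int)) : ∀ (pre : List (Option Int)) (beat : Int)
    (longest : Option (List String)) (cur : List Char), ys ≠ [] →
    (PySem.List.pyRange (pre.length : Int) ((pre.length + ys.length : Nat) : Int) 1).foldl
        (aBody (pre ++ ys) ((pre.length + ys.length : Nat) : Int))
        (beat, (cur.length : Int), longest, cur)
      = (((chainsAt ys (pre.length : Int) cur).foldl selStep (beat, longest)).1, 0,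
         ((chainsAt ys (pre.length : Int) cur).foldl selStep (beat, longest)).2, ([] : List Char)) := by
  match ys with
  | [] => intro _ _ _ _ h; exact absurd rfl h
  | [x] =>
      intro pre beat longest cur _
      have hrange : PySem.List.pyRange (pre.length : Int) ((pre.length + [x].length : Nat) : Int) 1
          = [(pre.length : Int)] := by
        have h1 : ((pre.length + [x].length : Nat) : Int) = (pre.length : Int) + 1 := by
          push_cast; simp
        rw [h1]; exact PySem.List.pyRange_one_singleton _
      have hget : PySem.List.pyGetD (pre ++ [x]) (pre.length : Int) none = x := by
        rw [PySem.List.pyGetD_natCast]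
        rw [List.getD_eq_getElem?_getD]
        simp
      have hlast : (((pre.length : Int)) == (((pre.length + [x].length : Nat) : Int) - 1)) = true := by
        rw [beq_iff_eq]; push_cast; simp
      rw [hrange, List.foldl_cons, List.foldl_nil]
      cases x with
      | none =>
          simp only [aBody, hget, hlast, chainsAt, List.foldl_cons, List.foldl_nil, selStep]
          simp
      | some v =>
          have hlen : (((cur ++ [Char.ofNat (((pre.length : Int) + 97).toNat)]).length : Int))
              = (cur.length : Int) + 1 := by simp
          simp only [aBody, hget, hlast, chainsAt, List.foldl_cons, List.foldl_nil, selStep]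
          simp
  | x :: y :: t =>
      intro pre beat longest cur _
      have hcons : PySem.List.pyRange (pre.length : Int)
            ((pre.length + (x :: y :: t).length : Nat) : Int) 1
          = (pre.length : Int) ::
            PySem.List.pyRange ((pre.length : Int) + 1)
              ((pre.length + (x :: y :: t).length : Nat) : Int) 1 :=
        PySem.List.pyRange_one_cons (by simp only [List.length_cons]; push_cast; omega)
      have hget : PySem.List.pyGetD (pre ++ x :: y :: t) (pre.length : Int) none = x := by
        rw [PySem.List.pyGetD_natCast]
        rw [List.getD_eq_getElem?_getD]
        simp
      have hnotlast : (((pre.length : Int)) ==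
          (((pre.length + (x :: y :: t).length : Nat) : Int) - 1)) = false := by
        rw [beq_eq_false_iff_ne]
        simp only [List.length_cons]
        push_cast; omega
      rw [hcons, List.foldl_cons]
      have e1 : (((pre ++ [x]).length : Nat) : Int) = (pre.length : Int) + 1 := by simp
      have e3 : (((pre ++ [x]).length + (y :: t).length : Nat) : Int)
          = ((pre.length + (x :: y :: t).length : Nat) : Int) := by push_cast; simp; omega
      have e2 : (pre ++ [x]) ++ (y :: t) = pre ++ (x :: y :: t) := by simp
      cases x with
      | none =>
          have hstep : aBody (pre ++ none :: y :: t)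
                ((pre.length + (none :: y :: t).length : Nat) : Int)
                (beat, (cur.length : Int), longest, cur) (pre.length : Int)
              = ((selStep (beat, longest) cur).1, ((([] : List Char).length : Nat) : Int),
                 (selStep (beat, longest) cur).2, ([] : List Char)) := by
            simp only [aBody, hget, hnotlast, selStep]
            simp
          rw [hstep]
          have ih := loopA (y :: t) (pre ++ [none]) (selStep (beat, longest) cur).1
            (selStep (beat, longest) cur).2 [] (by simp)
          rw [e1, e2, e3] at ih
          rw [ih]
          have hch : chainsAt (none :: y :: t) (pre.length : Int) cur
              = cur :: chainsAt (y :: t) ((pre.length : Int) + 1) [] := by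
            simp [chainsAt]
          rw [hch, List.foldl_cons]
      | some v =>
          have hlen : (((cur ++ [Char.ofNat (((pre.length : Int) + 97).toNat)]).length : Nat) : Int)
              = (cur.length : Int) + 1 := by simp
          have hstep : aBody (pre ++ some v :: y :: t)
                ((pre.length + (some v :: y :: t).length : Nat) : Int)
                (beat, (cur.length : Int), longest, cur) (pre.length : Int)
              = (beat, (((cur ++ [Char.ofNat (((pre.length : Int) + 97).toNat)]).length : Nat) : Int),
                 longest, cur ++ [Char.ofNat (((pre.length : Int) + 97).toNat)]) := by
            simp only [aBody, hget, hnotlast]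
            simp
          rw [hstep]
          have ih := loopA (y :: t) (pre ++ [some v]) beat longest
            (cur ++ [Char.ofNat (((pre.length : Int) + 97).toNat)]) (by simp)
          rw [e1, e2, e3] at ih
          rw [ih]
          have hch : chainsAt (some v :: y :: t) (pre.length : Int) cur
              = chainsAt (y :: t) ((pre.length : Int) + 1)
                  (cur ++ [Char.ofNat (((pre.length : Int) + 97).toNat)]) := by
            simp [chainsAt]
          rw [hch]

-- B's enumerate loop + trailing flush computes chainsAt
lemma loopB (ys : List (Option Int)) : ∀ (k : Int) (acc : List (List Char)) (cur : List Char), ys ≠ [] →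
    (if ys.getLast?.getD none ≠ none then
       ((PySem.List.enumerate ys k).foldl bStep (acc, cur)).1 ++
         [((PySem.List.enumerate ys k).foldl bStep (acc, cur)).2]
     else ((PySem.List.enumerate ys k).foldl bStep (acc, cur)).1)
      = acc ++ chainsAt ys k cur := by
  match ys with
  | [] => intro _ _ _ h; exact absurd rfl h
  | [x] =>
      intro k acc cur _
      cases x <;> simp [PySem.List.enumerate_cons, PySem.List.enumerate_nil, bStep, chainsAt]
  | x :: y :: t =>
      intro k acc cur _
      have ih := loopB (y :: t) (k + 1)
      cases x with
      | none =>
          rw [PySem.List.enumerate_cons, List.foldl_cons,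
            show bStep (acc, cur) (k, none) = (acc ++ [cur], ([] : List Char)) from rfl,
            List.getLast?_cons_cons]
          rw [ih (acc ++ [cur]) [] (by simp)]
          simp [chainsAt]
      | some v =>
          rw [PySem.List.enumerate_cons, List.foldl_cons,
            show bStep (acc, cur) (k, some v)
              = (acc, cur ++ [Char.ofNat ((k + 97).toNat)]) from rfl,
            List.getLast?_cons_cons]
          rw [ih acc (cur ++ [Char.ofNat ((k + 97).toNat)]) (by simp)]
          simp [chainsAt]

lemma pyGetD_neg_one (wa : List (Option Int)) (h : wa ≠ []) :
    PySem.List.pyGetD wa (-1) none = wa.getLast?.getD none := by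
  have hn : 0 < wa.length := List.length_pos_iff.mpr h
  simp only [PySem.List.pyGetD, PySem.List.pyGet?, PySem.List.pyIdx?]
  rw [if_neg (by omega), if_pos (by omega)]
  simp [List.getLast?_eq_getElem?, Option.bind]

-- ===== VERDICT (by name: the statement is the Claim_ definition above) =====
lemma max?_map_len (c : List Char) (r : List (List Char)) :
    ((c :: r).map (fun x => (x.length : Int))).max? = some (maxFrom (c.length : Int) r) := by
  rw [List.map_cons, List.max?_cons']
  rfl

theorem find_chains_for_word_spec : Claim_equal_find_chains_for_word := by
  unfold Claim_equal_find_chains_for_word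
  intro wa prev _
  unfold Spec_find_chains_for_word
  cases wa with
  | nil => rfl
  | cons h0 t0 =>
      have hne : (h0 :: t0 : List (Option Int)) ≠ [] := by simp
      -- A side
      have ihA := loopA (h0 :: t0) [] prev none [] hne
      simp only [List.nil_append, List.length_nil, List.length_cons, Nat.cast_zero,
        zero_add] at ihA
      -- B side
      have ihB := loopB (h0 :: t0) 0 [] [] hne
      simp only [List.nil_append] at ihB
      rcases hq : chainsAt (h0 :: t0) 0 [] with _ | ⟨c, r⟩
      · exact absurd hq (chainsAt_ne_nil _ _ _ hne)
      · simp only [find_chains_for_word, find_chains_for_word_alt, PySem.List.len,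
          List.length_cons, List.isEmpty_cons, Bool.false_eq_true, if_false]
        rw [ihA, pyGetD_neg_one _ hne, ihB, hq, sel_none, max?_map_len]
        by_cases hlt : maxFrom (c.length : Int) r < prev
        · simp [hlt]
        · simp [hlt]
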